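-- pv_equiv track=rewrite | github.com/asmeurer/advent-of-code | 2022/day10.py | execute
-- ===== SOURCE A (Python) =====
-- def execute(cmds):
--     xvals = [1]
--     for cmd in cmds:
--         x = xvals[-1]
--         if cmd is None:
--             xvals.append(x)
--         else:
--             xvals.extend([x, x + cmd])
--
--     return xvals
-- ===== SOURCE B (Python) =====
-- def execute(cmds):
--     deltas = [1]
--     for cmd in cmds:
--         deltas.extend([0] if cmd is None else [0, cmd])
--     out = []
--     total = 0
--     for d in deltas:
--         total += d
--         out.append(total)
--     return out
-- ===== Notes on version B (the rewrite author's own statement) =====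
-- stated objective: alternative
-- what changed: B builds a flat delta table first (0 for noop, 0 then the addend for addx) and then takes its running prefix sums, instead of reading the last element of the growing list and extending it in one loop.
import Mathlib
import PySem

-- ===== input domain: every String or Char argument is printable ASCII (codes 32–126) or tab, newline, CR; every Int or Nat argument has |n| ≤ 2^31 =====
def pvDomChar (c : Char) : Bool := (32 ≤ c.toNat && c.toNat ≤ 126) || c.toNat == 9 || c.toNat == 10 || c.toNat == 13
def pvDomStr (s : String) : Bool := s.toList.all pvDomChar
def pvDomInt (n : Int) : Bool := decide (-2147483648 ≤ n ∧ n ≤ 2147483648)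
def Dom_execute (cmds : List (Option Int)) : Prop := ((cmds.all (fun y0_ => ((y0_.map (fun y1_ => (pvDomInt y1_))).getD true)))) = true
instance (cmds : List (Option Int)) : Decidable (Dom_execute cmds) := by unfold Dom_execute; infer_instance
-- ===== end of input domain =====

-- B builds the delta table first and then takes running prefix sums, instead of
-- extending the list from its last element in one loop (alternative decomposition, same cost).


-- ===== PORT A =====
-- for cmd in cmds: x = xvals[-1]; append x (noop) or extend [x, x+cmd] (addx)
def execute (cmds : List (Option Int)) : List Int :=
  cmds.foldl
    (fun xvals cmd =>
      let x := (PySem.List.pyGet? xvals (-1)).getD 0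
      match cmd with
      | none => xvals ++ [x]
      | some c => xvals ++ [x, x + c])
    [1]

-- ===== PORT B =====
-- first loop of Source B: build the delta table
def executeDeltas (cmds : List (Option Int)) : List Int :=
  cmds.foldl
    (fun deltas cmd =>
      deltas ++ (match cmd with | none => [0] | some c => [0, c]))
    [1]

-- second loop of Source B: running prefix sums with (total, out) state
def execute_alt (cmds : List (Option Int)) : List Int :=
  ((executeDeltas cmds).foldl
    (fun st d => (st.1 + d, st.2 ++ [st.1 + d]))
    ((0 : Int), ([] : List Int))).2

-- ===== PRECONDITION & SPEC =====
def Spec_execute (cmds : List (Option Int)) (out : List Int) : Prop := out = execute_alt cmds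
instance (cmds : List (Option Int)) (out : List Int) : Decidable (Spec_execute cmds out) := by unfold Spec_execute; infer_instance

-- ===== CLAIM (what is proved, stated in full; the proofs are below) =====
def Claim_equal_execute : Prop := ∀ (cmds : List (Option Int)), Dom_execute cmds → Spec_execute cmds (execute cmds)

-- ===== LEMMAS AND PROOFS =====

-- reference prefix-sum function both ports are related to
def pvAccum (t : Int) : List Int → List Int
  | [] => []
  | d :: ds => (t + d) :: pvAccum (t + d) ds

-- the delta tail of the command list
def pvDTail (cmds : List (Option Int)) : List Int :=
  cmds.flatMap (fun cmd => match cmd with | none => [0] | some c => [0, c])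

theorem executeDeltas_loop (cmds : List (Option Int)) (init : List Int) :
    cmds.foldl (fun deltas cmd =>
        deltas ++ (match cmd with | none => [0] | some c => [0, c])) init
      = init ++ pvDTail cmds := by
  induction cmds generalizing init with
  | nil => simp [pvDTail]
  | cons c cs ih => cases c <;> simp [pvDTail, List.foldl, ih, List.flatMap_cons]

theorem accum_loop (ds : List Int) (t : Int) (out : List Int) :
    (ds.foldl (fun st d => (st.1 + d, st.2 ++ [st.1 + d])) (t, out)).2
      = out ++ pvAccum t ds := by
  induction ds generalizing t out with
  | nil => simp [pvAccum]
  | cons d ds ih => simp [List.foldl, ih, pvAccum]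

theorem execute_loop (cmds : List (Option Int)) (pre : List Int) (t : Int) :
    cmds.foldl (fun xvals cmd =>
        let x := (PySem.List.pyGet? xvals (-1)).getD 0
        match cmd with
        | none => xvals ++ [x]
        | some c => xvals ++ [x, x + c]) (pre ++ [t])
      = (pre ++ [t]) ++ pvAccum t (pvDTail cmds) := by
  induction cmds generalizing pre t with
  | nil => simp [pvDTail, pvAccum]
  | cons c cs ih =>
    cases c with
    | none =>
      have h := ih (pre ++ [t]) t
      simp only [List.foldl, PySem.List.pyGet?_neg_one_append_singleton, Option.getD_some] at h ⊢
      rw [h]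
      simp [pvDTail, pvAccum, List.flatMap_cons]
    | some v =>
      have h := ih (pre ++ [t] ++ [t]) (t + v)
      simp only [List.foldl, PySem.List.pyGet?_neg_one_append_singleton, Option.getD_some] at h ⊢
      have e : (pre ++ [t]) ++ [t, t + v] = ((pre ++ [t] ++ [t]) ++ [t + v]) := by simp
      rw [e, h]
      simp [pvDTail, pvAccum, List.flatMap_cons]

-- ===== VERDICT (by name: the statement is the Claim_ definition above) =====
theorem execute_spec : Claim_equal_execute := by
  intro cmds _
  unfold Spec_execute execute execute_alt executeDeltas
  rw [executeDeltas_loop]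
  have hA := execute_loop cmds [] 1
  simp only [List.nil_append] at hA
  rw [hA, accum_loop]
  simp [pvAccum, pvDTail]
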